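-- pv_equiv track=rewrite | github.com/PiErr0r/comp_prog | euler/u100/051.py | has_repeating
-- ===== SOURCE A (Python) =====
-- def get_list_n(n):
-- 	l = []
-- 	while n:
-- 		l.append(n % 10)
-- 		n //= 10
-- 	return list(reversed(l))
--
-- def has_repeating(n):
-- 	l = get_list_n(n)
-- 	res = {}
-- 	for i in range(10):
-- 		if l.count(i) > 1:
-- 			res[i] = []
-- 			for j in range(len(l)):
-- 				if i == l[j]:
-- 					res[i].append(j)
-- 	return res
-- ===== SOURCE B (Python) =====
-- def get_list_n(n):
-- 	l = []
-- 	while n: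
-- 		l.append(n % 10)
-- 		n //= 10
-- 	return list(reversed(l))
--
-- def has_repeating(n):
-- 	l = get_list_n(n)
-- 	pos = {}
-- 	for j, d in enumerate(l):
-- 		pos.setdefault(d, []).append(j)
-- 	return {d: pos[d] for d in sorted(pos) if len(pos[d]) > 1}
-- ===== Notes on version B (the rewrite author's own statement) =====
-- stated objective: simpler
-- what changed: Replaced the loop over all ten digit values (count() scan plus inner position rescan) by a single enumerate pass building a digit->positions dict, then a filtered comprehension over the sorted keys.
import Mathlib
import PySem

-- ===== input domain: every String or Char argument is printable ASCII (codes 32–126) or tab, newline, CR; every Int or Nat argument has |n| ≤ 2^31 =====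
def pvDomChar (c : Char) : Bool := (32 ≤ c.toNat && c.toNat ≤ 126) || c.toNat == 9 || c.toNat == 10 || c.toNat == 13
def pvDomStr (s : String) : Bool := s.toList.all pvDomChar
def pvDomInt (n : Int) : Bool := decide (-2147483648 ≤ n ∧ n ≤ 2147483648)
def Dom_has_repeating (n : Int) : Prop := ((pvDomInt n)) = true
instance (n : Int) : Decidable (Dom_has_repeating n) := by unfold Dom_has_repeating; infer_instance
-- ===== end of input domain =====

-- B replaces A's loop over all ten digit values (count + rescan) by one enumerate pass building a
-- digit->positions dict, then a filtered comprehension over the sorted keys; objective: simpler.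


-- ===== PORT A =====
-- 'while n:' loop of get_list_n; the fuel (n.natAbs + 1) only makes the recursion total
-- (for n ≥ 0 it never runs out; for n < 0 the Python loop never terminates)
def getListLoop : Nat → Int → List Int → List Int
  | 0, _, acc => acc
  | f + 1, m, acc =>
      if m ≠ 0 then getListLoop f (PySem.Int.floordiv m 10) (acc ++ [PySem.Int.mod m 10]) else acc

def get_list_n (n : Int) : List Int := (getListLoop (n.natAbs + 1) n []).reverse

def has_repeating (n : Int) : List (Int × List Int) :=
  let l := get_list_n n
  ((PySem.List.pyRange 0 10 1).foldl
    (fun res i =>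
      if 1 < PySem.List.count l i then
        (PySem.List.pyRange 0 (PySem.List.len l) 1).foldl
          (fun res2 j =>
            if i = PySem.List.pyGetD l j 0 then res2.modify i [] (fun p => p ++ [j]) else res2)
          (res.insert i ([] : List Int))
      else res)
    PySem.Dict.empty).items

-- ===== PORT B =====
def has_repeating_alt (n : Int) : List (Int × List Int) :=
  let l := get_list_n n
  -- pos.setdefault(d, []).append(j)  ≡  pos[d] = pos.get(d, []) + [j]
  let pos := (PySem.List.enumerate l).foldl
    (fun d p => d.modify p.2 [] (fun q => q ++ [p.1])) PySem.Dict.empty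
  (((PySem.List.sorted (PySem.Dict.keys pos) (fun x => x)).filter
      (fun d => 1 < (pos.getD d []).length)).foldl
    (fun out d => out.insert d (pos.getD d [])) PySem.Dict.empty).items

-- ===== PRECONDITION & SPEC =====
-- (no Pre_: on n < 0 both Pythons diverge the same way in get_list_n, and the fuelled ports
--  still agree with each other there, so plain equivalence is provable)
def Spec_has_repeating (n : Int) (out : List (Int × List Int)) : Prop := out = has_repeating_alt n
instance (n : Int) (out : List (Int × List Int)) : Decidable (Spec_has_repeating n out) := by unfold Spec_has_repeating; infer_instance

-- ===== CLAIM (what is proved, stated in full; the proofs are below) =====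
def Claim_equal_has_repeating : Prop := ∀ (n : Int), Dom_has_repeating n → Spec_has_repeating n (has_repeating n)

-- ===== LEMMAS AND PROOFS =====

-- every digit produced by get_list_n lies in [0, 10)
lemma getListLoop_digits (f : Nat) (m : Int) (acc : List Int)
    (hacc : ∀ x ∈ acc, 0 ≤ x ∧ x < 10) :
    ∀ x ∈ getListLoop f m acc, 0 ≤ x ∧ x < 10 := by
  induction f generalizing m acc with
  | zero => simpa [getListLoop] using hacc
  | succ f ih =>
      simp only [getListLoop]
      split
      · exact ih _ _ (by
          intro x hx
          rcases List.mem_append.1 hx with h | h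
          · exact hacc x h
          · simp only [List.mem_singleton] at h
            subst h
            exact ⟨PySem.Int.mod_nonneg _ (by norm_num : (0:Int) < 10), PySem.Int.mod_lt _ (by norm_num : (0:Int) < 10)⟩)
      · exact hacc

lemma get_list_n_digits (n : Int) : ∀ x ∈ get_list_n n, 0 ≤ x ∧ x < 10 := by
  intro x hx
  exact getListLoop_digits _ _ [] (by simp) x (List.mem_reverse.1 hx)

-- canonical positions list of digit i in l
def idxs (l : List Int) (i : Int) : List Int :=
  ((PySem.List.enumerate l).filter (fun p => p.2 == i)).map (fun p => p.1)

-- canonical form both ports are reduced to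
def canon (l : List Int) : List (Int × List Int) :=
  (([0,1,2,3,4,5,6,7,8,9] : List Int).filter
      (fun i => decide (1 < PySem.List.count l i))).map (fun i => (i, idxs l i))

lemma pyRange010 : PySem.List.pyRange 0 10 1 = ([0,1,2,3,4,5,6,7,8,9] : List Int) := by decide

lemma length_idxs (l : List Int) (i : Int) : (idxs l i).length = PySem.List.count l i := by
  unfold idxs
  rw [List.length_map, ← List.countP_eq_length_filter]
  calc List.countP (fun p => p.2 == i) (PySem.List.enumerate l)
      = List.countP ((fun x => x == i) ∘ (fun p : Int × Int => p.2)) (PySem.List.enumerate l) := rfl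
    _ = List.countP (fun x => x == i) ((PySem.List.enumerate l).map (fun p => p.2)) :=
        List.countP_map.symm
    _ = PySem.List.count l i := by rw [PySem.List.map_snd_enumerate]; rfl

lemma count_pos_mem {l : List Int} {i : Int} (h : 1 < PySem.List.count l i) : i ∈ l := by
  have h' : 0 < List.count i l := by
    have : PySem.List.count l i = List.count i l := rfl
    omega
  exact List.count_pos_iff.1 h'

-- A's filtered inner index list is idxs
lemma rangeFilter_eq_idxs (l : List Int) (i : Int) :
    (PySem.List.pyRange 0 (PySem.List.len l) 1).filter (fun j => decide (i = PySem.List.pyGetD l j 0))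
      = idxs l i := by
  unfold idxs
  rw [PySem.List.enumerate_eq_map_pyRange l 0, List.filter_map, List.map_map]
  have : ((fun p : Int × Int => p.1) ∘ fun j => (j, PySem.List.pyGetD l j 0)) = id := rfl
  rw [this, List.map_id]
  refine List.filter_congr (fun j _ => ?_)
  rcases eq_or_ne (PySem.List.pyGetD l j 0) i with h | h
  · simp [h]
  · simp [h, Ne.symm h]

-- Set.update adds nothing when every element is already present
lemma set_update_of_subset (xs s : List Int) (h : ∀ x ∈ xs, x ∈ s) :
    PySem.Set.update s xs = s := by
  induction xs generalizing s with
  | nil => rfl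
  | cons x xs ih =>
      have hx : PySem.Set.add s x = s := by
        simp [PySem.Set.add, h x (by simp)]
      calc PySem.Set.update s (x :: xs)
          = PySem.Set.update (PySem.Set.add s x) xs := rfl
        _ = PySem.Set.update s xs := by rw [hx]
        _ = s := ih s (fun y hy => h y (by simp [hy]))

-- generic constant-key modify-append loop: getD
lemma foldl_modify_const_getD (js : List Int) (i : Int) (d : PySem.Dict Int (List Int)) (c : Int) :
    (js.foldl (fun d2 j => d2.modify i [] (fun p => p ++ [j])) d).getD c []
      = if c = i then d.getD i [] ++ js else d.getD c [] := by
  have hmap : (js.map (fun j => ((i : Int), j))).foldl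
      (fun d2 p => d2.modify p.1 [] (fun x => x ++ [p.2])) d
      = js.foldl (fun d2 j => d2.modify i [] (fun p => p ++ [j])) d := List.foldl_map
  rw [← hmap, PySem.Dict.getD_foldl_modify_append, List.filter_map, List.map_map]
  rcases eq_or_ne c i with h | h
  · subst h
    simp
  · have : (fun p : Int × Int => p.1 == c) ∘ (fun j => ((i : Int), j)) = fun _ => false := by
      funext j
      simp [Ne.symm h]
    rw [this]
    simp [h]

-- generic constant-key modify-append loop: keys (when i already a key)
lemma foldl_modify_const_keys (js : List Int) (i : Int) (d : PySem.Dict Int (List Int))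
    (hi : i ∈ d.keys) :
    (js.foldl (fun d2 j => d2.modify i [] (fun p => p ++ [j])) d).keys = d.keys := by
  have h := PySem.Dict.keys_foldl_modify_key js (fun _ => i) ([] : List Int)
    (fun _ j => fun p => p ++ [j]) d
  simp only at h
  rw [h]
  exact set_update_of_subset _ _ (fun x hx => by
    rcases List.mem_map.1 hx with ⟨j, _, rfl⟩
    exact hi)

-- A's outer fold characterized
lemma A_items (l : List Int) (ds : List Int) (acc : PySem.Dict Int (List Int))
    (hnd : acc.keys.Nodup) (hdsnd : ds.Nodup)
    (hfresh : ∀ i ∈ ds, i ∉ acc.keys) :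
    (ds.foldl
      (fun res i =>
        if 1 < PySem.List.count l i then
          (PySem.List.pyRange 0 (PySem.List.len l) 1).foldl
            (fun res2 j =>
              if i = PySem.List.pyGetD l j 0 then res2.modify i [] (fun p => p ++ [j]) else res2)
            (res.insert i ([] : List Int))
        else res) acc).items
    = acc.items
      ++ (ds.filter (fun i => decide (1 < PySem.List.count l i))).map (fun i => (i, idxs l i)) := by
  induction ds generalizing acc with
  | nil => simp
  | cons i ds ih =>
      simp only [List.foldl_cons, List.filter_cons]
      by_cases hc : 1 < PySem.List.count l i
      · rw [if_pos hc, PySem.List.foldl_ite_eq_foldl_filter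
            (fun j => i = PySem.List.pyGetD l j 0)
            (fun (res2 : PySem.Dict Int (List Int)) (j : Int) =>
              PySem.Dict.modify res2 i [] (fun p => p ++ [j])), rangeFilter_eq_idxs]
        have hmem : i ∉ acc.keys := hfresh i (List.mem_cons_self)
        have hcont : acc.contains i = false := by
          rw [PySem.Dict.contains_eq_decide_mem_keys]
          simp [hmem]
        set acc1 := acc.insert i ([] : List Int) with hacc1
        set acc2 := (idxs l i).foldl (fun d2 j => d2.modify i [] (fun p => p ++ [j])) acc1
          with hacc2
        have hk1 : acc1.keys = acc.keys ++ [i] := PySem.Dict.keys_insert_of_not_contains _ _ hcont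
        have hk2 : acc2.keys = acc.keys ++ [i] := by
          rw [hacc2, foldl_modify_const_keys _ _ _ (by rw [hk1]; simp), hk1]
        have hnd2 : acc2.keys.Nodup := by
          rw [hk2]
          simpa [List.nodup_append] using ⟨hnd, fun a ha hai => hmem (hai ▸ ha)⟩
        have hitems2 : acc2.items = acc.items ++ [(i, idxs l i)] := by
          rw [PySem.Dict.items_eq_map_keys acc2 hnd2 ([] : List Int), hk2, List.map_append]
          congr 1
          · rw [PySem.Dict.items_eq_map_keys acc hnd ([] : List Int)]
            refine List.map_congr_left (fun k hk => ?_)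
            have hki : k ≠ i := fun h => hmem (h ▸ hk)
            rw [hacc2, foldl_modify_const_getD, if_neg hki, hacc1,
              PySem.Dict.getD_insert, if_neg hki]
          · simp only [List.map_cons, List.map_nil]
            rw [hacc2, foldl_modify_const_getD, if_pos rfl, hacc1,
              PySem.Dict.getD_insert, if_pos rfl]
            simp
        rw [ih acc2 hnd2 (List.nodup_cons.1 hdsnd).2
            (fun i' hi' => by
              rw [hk2]
              intro hmem'
              rcases List.mem_append.1 hmem' with h | h
              · exact hfresh i' (List.mem_cons_of_mem _ hi') h
              · simp only [List.mem_singleton] at h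
                exact (List.nodup_cons.1 hdsnd).1 (h ▸ hi')),
          hitems2]
        have hc' : 1 < List.count i l := hc
        simp [hc']
      · rw [if_neg hc]
        rw [ih acc hnd (List.nodup_cons.1 hdsnd).2
            (fun i' hi' => hfresh i' (List.mem_cons_of_mem _ hi'))]
        have hc' : ¬ 1 < List.count i l := hc
        simp [hc']

lemma A_eq_canon (n : Int) : has_repeating n = canon (get_list_n n) := by
  unfold has_repeating
  rw [pyRange010]
  have h := A_items (get_list_n n) [0,1,2,3,4,5,6,7,8,9] PySem.Dict.empty
    (by simp [PySem.Dict.keys_empty]) (by decide) (by simp [PySem.Dict.keys_empty])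
  simpa [canon] using h

-- B's position dict: getD and keys
lemma posDict_getD (l : List Int) (c : Int) :
    ((PySem.List.enumerate l).foldl
      (fun d p => d.modify p.2 [] (fun q => q ++ [p.1])) PySem.Dict.empty).getD c []
      = idxs l c := by
  have hmap : (((PySem.List.enumerate l).map (fun p => (p.2, p.1))).foldl
      (fun d p => d.modify p.1 [] (fun q => q ++ [p.2])) PySem.Dict.empty)
      = (PySem.List.enumerate l).foldl
        (fun d p => d.modify p.2 [] (fun q => q ++ [p.1])) PySem.Dict.empty := List.foldl_map
  rw [← hmap, PySem.Dict.getD_foldl_modify_append, List.filter_map, List.map_map]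
  simp only [PySem.Dict.getD_empty, List.nil_append, idxs]
  rfl

lemma posDict_keys (l : List Int) :
    ((PySem.List.enumerate l).foldl
      (fun d p => d.modify p.2 [] (fun q => q ++ [p.1])) PySem.Dict.empty).keys
      = PySem.Set.ofList l := by
  have h := PySem.Dict.keys_foldl_modify_key (PySem.List.enumerate l)
    (fun p : Int × Int => p.2) ([] : List Int) (fun _ p => fun q => q ++ [p.1]) PySem.Dict.empty
  simp only at h
  rw [h, PySem.Dict.keys_empty, PySem.List.map_snd_enumerate, PySem.Set.ofList_eq_foldl]
  rfl

lemma B_core (l : List Int) (h10 : ∀ x ∈ l, 0 ≤ x ∧ x < 10) :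
    (let pos := (PySem.List.enumerate l).foldl
        (fun d p => d.modify p.2 [] (fun q => q ++ [p.1])) PySem.Dict.empty;
      (((PySem.List.sorted (PySem.Dict.keys pos) (fun x => x)).filter
          (fun d => 1 < (pos.getD d []).length)).foldl
        (fun out d => out.insert d (pos.getD d [])) PySem.Dict.empty).items)
    = canon l := by
  simp only []
  set pos := (PySem.List.enumerate l).foldl
    (fun d p => d.modify p.2 [] (fun q => q ++ [p.1])) PySem.Dict.empty with hpos
  have hget : ∀ c, pos.getD c [] = idxs l c := fun c => posDict_getD l c
  have hkeys : pos.keys = PySem.Set.ofList l := posDict_keys l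
  have hnine : ([0,1,2,3,4,5,6,7,8,9] : List Int).Nodup := by decide
  have hks : PySem.List.sorted pos.keys (fun x => x)
      = ([0,1,2,3,4,5,6,7,8,9] : List Int).filter (fun i => decide (i ∈ l)) := by
    apply PySem.List.sorted_eq_of_perm_of_pairwise_lt
    · rw [List.perm_ext_iff_of_nodup (List.Nodup.filter _ hnine)
        (hkeys ▸ PySem.Set.nodup_ofList l)]
      intro a
      rw [hkeys, PySem.Set.mem_ofList]
      simp only [List.mem_filter, decide_eq_true_eq]
      constructor
      · exact fun h => h.2
      · intro ha
        refine ⟨?_, ha⟩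
        have := h10 a ha
        have h0 : a = 0 ∨ a = 1 ∨ a = 2 ∨ a = 3 ∨ a = 4 ∨ a = 5 ∨ a = 6 ∨ a = 7 ∨ a = 8 ∨ a = 9 := by omega
        rcases h0 with h|h|h|h|h|h|h|h|h|h <;> subst h <;> decide
    · exact List.Pairwise.filter _ (by decide)
  rw [hks]
  have hfilt : (([0,1,2,3,4,5,6,7,8,9] : List Int).filter (fun i => decide (i ∈ l))).filter
        (fun d => decide (1 < (pos.getD d []).length))
      = ([0,1,2,3,4,5,6,7,8,9] : List Int).filter (fun i => decide (1 < PySem.List.count l i)) := by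
    rw [List.filter_filter]
    refine List.filter_congr (fun d _ => ?_)
    rw [hget, length_idxs]
    by_cases hc : 1 < PySem.List.count l d
    · have hc' : 1 < List.count d l := hc
      simp [hc', count_pos_mem hc]
    · have hc' : ¬ 1 < List.count d l := hc
      simp [hc']
  have hnodup : (List.map (fun d => d)
      ((([0,1,2,3,4,5,6,7,8,9] : List Int).filter (fun i => decide (i ∈ l))).filter
        (fun d => decide (1 < (pos.getD d []).length)))).Nodup := by
    rw [List.map_id']
    exact List.Nodup.filter _ (List.Nodup.filter _ hnine)
  rw [PySem.Dict.items_foldl_insert_fresh _ (fun d => d) (fun d => pos.getD d [])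
    PySem.Dict.empty (fun a _ => PySem.Dict.contains_empty a) hnodup]
  rw [hfilt]
  unfold canon
  have hemp : (PySem.Dict.empty : PySem.Dict Int (List Int)).items = [] := rfl
  rw [hemp, List.nil_append]
  exact List.map_congr_left (fun d _ => by rw [hget])

lemma B_eq_canon (n : Int) : has_repeating_alt n = canon (get_list_n n) :=
  B_core (get_list_n n) (get_list_n_digits n)

-- ===== VERDICT (by name: the statement is the Claim_ definition above) =====
theorem has_repeating_spec : Claim_equal_has_repeating := by
  intro n _
  unfold Spec_has_repeating
  rw [A_eq_canon, B_eq_canon]
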